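-- pv_equiv track=rewrite | github.com/moraivanec/TPS-AyED1 | Trabajo Practico N3/Ejercicio_2.py | matriz_e
-- ===== SOURCE A (Python) =====
-- def matriz_e(tamanio):
--     """
--     Precondiciones:
--     - 'tamanio' debe ser un número entero positivo.
--
--     Postcondiciones:
--     - Devuelve una matriz de enteros de tamaño 'tamanio' x 'tamanio' con un patrón específico.
--     """
--     matriz = []
--     for i in range(tamanio):
--         fila = [0] * tamanio
--         for j in range(tamanio):
--             fila[j] = (i * 2 + j) % tamanio # Asigna valores según el patrón
--         matriz.append(fila)
--     return matriz
-- ===== SOURCE B (Python) =====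
-- def matriz_e(tamanio):
--     base = list(range(tamanio))
--     matriz = []
--     for i in range(tamanio):
--         shift = (2 * i) % tamanio
--         matriz.append(base[shift:] + base[:shift])
--     return matriz
-- ===== Notes on version B (the rewrite author's own statement) =====
-- stated objective: simpler
-- what changed: B precomputes the base row 0..n-1 once and emits each row as a cyclic rotation (base[shift:] + base[:shift] with shift = (2*i) % n), removing A's per-cell modulo loop and in-place fila[j] assignments.
import Mathlib
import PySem

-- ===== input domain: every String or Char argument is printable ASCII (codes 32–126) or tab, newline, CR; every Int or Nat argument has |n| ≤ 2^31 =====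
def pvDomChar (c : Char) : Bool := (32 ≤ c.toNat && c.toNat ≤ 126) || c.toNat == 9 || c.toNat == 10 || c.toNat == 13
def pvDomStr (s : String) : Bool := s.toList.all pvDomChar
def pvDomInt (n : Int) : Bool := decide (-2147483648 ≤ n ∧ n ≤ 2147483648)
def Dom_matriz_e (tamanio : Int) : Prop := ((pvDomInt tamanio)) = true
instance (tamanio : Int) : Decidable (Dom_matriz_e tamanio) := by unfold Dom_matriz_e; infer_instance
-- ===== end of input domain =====

-- B builds the base row 0..n-1 once and emits each row as a cyclic rotation of it
-- (shift = (2*i) % n), instead of A's per-cell (i*2+j) % n assignments; objective: simpler.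

-- ===== PORT A =====
def matriz_e (tamanio : Int) : List (List Int) :=
  (PySem.List.pyRange 0 tamanio 1).foldl (fun matriz i =>
    let fila := List.replicate tamanio.toNat (0 : Int)
    let fila := (PySem.List.pyRange 0 tamanio 1).foldl
      (fun fl j => PySem.List.pySetD fl j (PySem.Int.mod (i * 2 + j) tamanio)) fila
    matriz ++ [fila]) []

-- ===== PORT B =====
def matriz_e_alt (tamanio : Int) : List (List Int) :=
  let base := PySem.List.pyRange 0 tamanio 1
  (PySem.List.pyRange 0 tamanio 1).foldl (fun matriz i =>
    let shift := PySem.Int.mod (2 * i) tamanio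
    matriz ++ [PySem.List.slice base (some shift) none ++
               PySem.List.slice base none (some shift)]) []

-- ===== PRECONDITION & SPEC =====
def Spec_matriz_e (tamanio : Int) (out : List (List Int)) : Prop := out = matriz_e_alt tamanio
instance (tamanio : Int) (out : List (List Int)) : Decidable (Spec_matriz_e tamanio out) := by unfold Spec_matriz_e; infer_instance

-- ===== CLAIM (what is proved, stated in full; the proofs are below) =====
def Claim_equal_matriz_e : Prop := ∀ (tamanio : Int), Dom_matriz_e tamanio → Spec_matriz_e tamanio (matriz_e tamanio)

-- ===== LEMMAS AND PROOFS =====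

theorem take_set_succ (fila : List Int) (k : Nat) (v : Int) (h : k < fila.length) :
    (fila.set k v).take (k+1) = fila.take k ++ [v] := by
  rw [List.take_add_one]
  rw [List.take_set]
  rw [List.set_eq_of_length_le (by simp : (fila.take k).length ≤ k)]
  simp [h]

-- A's inner loop: writing f j into slot j for j = a..n-1 leaves the prefix and
-- replaces the rest by the mapped range.
theorem set_loop (n : Int) (f : Int → Int) :
    ∀ (k : Nat) (a : Int) (fila : List Int), 0 ≤ a → (n - a).toNat = k →
      fila.length = n.toNat →
      (PySem.List.pyRange a n 1).foldl (fun fl j => PySem.List.pySetD fl j (f j)) fila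
        = fila.take a.toNat ++ (PySem.List.pyRange a n 1).map f := by
  intro k
  induction k with
  | zero =>
    intro a fila ha hk hlen
    have hna : n ≤ a := by omega
    rw [PySem.List.pyRange_one_eq_nil hna]
    simp [List.take_of_length_le, hlen, show n.toNat ≤ a.toNat by omega]
  | succ k ih =>
    intro a fila ha hk hlen
    have han : a < n := by omega
    rw [PySem.List.pyRange_one_cons han]
    simp only [List.foldl_cons, List.map_cons]
    rw [PySem.List.pySetD_of_nonneg fila (f a) ha]
    rw [ih (a+1) (fila.set a.toNat (f a)) (by omega) (by omega) (by simp [hlen])]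
    have hlt : a.toNat < fila.length := by omega
    have h1 : (a+1).toNat = a.toNat + 1 := by omega
    rw [h1, take_set_succ fila a.toNat (f a) hlt]
    simp

-- One row: the mapped modulo pattern is a rotation of the base range by s = (2*i) % n.
theorem row_eq (n i : Int) (hn : 0 < n) :
    (PySem.List.pyRange 0 n 1).map (fun j => PySem.Int.mod (i * 2 + j) n)
      = PySem.List.slice (PySem.List.pyRange 0 n 1) (some (PySem.Int.mod (2 * i) n)) none ++
        PySem.List.slice (PySem.List.pyRange 0 n 1) none (some (PySem.Int.mod (2 * i) n)) := by
  set s := PySem.Int.mod (2 * i) n with hs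
  have hs0 : 0 ≤ s := PySem.Int.mod_nonneg _ hn
  have hs1 : s < n := PySem.Int.mod_lt _ hn
  rw [PySem.List.slice_from _ hs0, PySem.List.slice_to _ hs0]
  have hsplitR : PySem.List.pyRange 0 n 1
      = PySem.List.pyRange 0 s 1 ++ PySem.List.pyRange s n 1 :=
    PySem.List.pyRange_one_append 0 s n hs0 (le_of_lt hs1)
  have hlen0s : (PySem.List.pyRange 0 s 1).length = s.toNat := by
    rw [PySem.List.length_pyRange_one]; omega
  have hdrop : (PySem.List.pyRange 0 n 1).drop s.toNat = PySem.List.pyRange s n 1 := by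
    rw [hsplitR, ← hlen0s, List.drop_left]
  have htake : (PySem.List.pyRange 0 n 1).take s.toNat = PySem.List.pyRange 0 s 1 := by
    rw [hsplitR, List.take_left' hlen0s]
  rw [hdrop, htake]
  have hmod : ∀ j, PySem.Int.mod (i * 2 + j) n = (s + j) % n := by
    intro j
    rw [hs, PySem.Int.mod_eq_emod_of_pos hn, PySem.Int.mod_eq_emod_of_pos hn,
        Int.emod_add_emod]
    ring_nf
  rw [PySem.List.pyRange_one_append 0 (n - s) n (by omega) (by omega), List.map_append]
  congr 1
  · -- low part: j < n - s, value s + j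
    rw [List.map_congr_left (l := PySem.List.pyRange 0 (n-s) 1)
        (g := fun j => s + j) ?_]
    · rw [PySem.List.pyRange_one 0 (n-s), PySem.List.pyRange_one s n, List.map_map]
      have : (n - s - 0).toNat = (n - s).toNat := by omega
      rw [this]
      apply List.map_congr_left; intro k _
      simp
    · intro j hj
      rw [PySem.List.mem_pyRange_one] at hj
      rw [hmod j, Int.emod_eq_of_lt (by omega) (by omega)]
  · -- high part: n - s ≤ j < n, value s + j - n
    rw [List.map_congr_left (l := PySem.List.pyRange (n-s) n 1)
        (g := fun j => s + j - n) ?_]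
    · rw [PySem.List.pyRange_one (n-s) n, PySem.List.pyRange_one 0 s, List.map_map]
      have : (n - (n - s)).toNat = (s - 0).toNat := by omega
      rw [this]
      apply List.map_congr_left; intro k _
      simp; ring
    · intro j hj
      rw [PySem.List.mem_pyRange_one] at hj
      rw [hmod j]
      have : s + j = (s + j - n) + n * 1 := by ring
      rw [this, Int.add_mul_emod_self_left,
          Int.emod_eq_of_lt (by omega) (by omega)]

-- ===== VERDICT (by name: the statement is the Claim_ definition above) =====
theorem matriz_e_spec : Claim_equal_matriz_e := by
  intro n _
  unfold Spec_matriz_e matriz_e matriz_e_alt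
  by_cases hn : n ≤ 0
  case pos =>
    rw [PySem.List.pyRange_one_eq_nil hn]
    simp
  case neg =>
    have hn : 0 < n := by omega
    simp only [PySem.List.foldl_append_singleton_eq_map, List.nil_append]
    apply List.map_congr_left
    intro i _
    rw [set_loop n (fun j => PySem.Int.mod (i * 2 + j) n) (n - 0).toNat 0
        (List.replicate n.toNat (0:Int)) le_rfl rfl (by simp)]
    simp only [Int.toNat_zero, List.take_zero, List.nil_append]
    exact row_eq n i hn
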